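-- pv_equiv track=rewrite | github.com/drichter-official/calendar | custom_sudoku_generator/sudoku_whisper_rule/rule.py | _can_extend_without_touching
-- ===== SOURCE A (Python) =====
-- def _can_extend_without_touching(path, next_cell):
--     """
--     Check if adding next_cell to the current path would cause the path
--     to touch itself (excluding adjacency to the current last cell).
--     """
--     # allow adjacency to only the last cell in the path
--     last = path[-1]
--     for i, cell in enumerate(path):
--         if cell == last:
--             continue
--         if max(abs(cell[0] - next_cell[0]), abs(cell[1] - next_cell[1])) == 1:
--             return False
--     return True
-- ===== SOURCE B (Python) =====
-- def _can_extend_without_touching(path, next_cell):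
--     """
--     Check if adding next_cell to the current path would cause the path
--     to touch itself (excluding adjacency to the current last cell).
--     """
--     last = path[-1]
--     occupied = set(path)
--     occupied.discard(last)
--     r, c = next_cell
--     for dr in (-1, 0, 1):
--         for dc in (-1, 0, 1):
--             if dr == 0 and dc == 0:
--                 continue
--             if (r + dr, c + dc) in occupied:
--                 return False
--     return True
-- ===== Notes on version B (the rewrite author's own statement) =====
-- stated objective: alternative
-- what changed: Instead of scanning every path cell and computing its Chebyshev distance to next_cell, B builds a set of occupied cells (with all copies of the last cell removed) once and probes only the 8 fixed neighbours of next_cell with O(1) set lookups.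
import Mathlib
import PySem

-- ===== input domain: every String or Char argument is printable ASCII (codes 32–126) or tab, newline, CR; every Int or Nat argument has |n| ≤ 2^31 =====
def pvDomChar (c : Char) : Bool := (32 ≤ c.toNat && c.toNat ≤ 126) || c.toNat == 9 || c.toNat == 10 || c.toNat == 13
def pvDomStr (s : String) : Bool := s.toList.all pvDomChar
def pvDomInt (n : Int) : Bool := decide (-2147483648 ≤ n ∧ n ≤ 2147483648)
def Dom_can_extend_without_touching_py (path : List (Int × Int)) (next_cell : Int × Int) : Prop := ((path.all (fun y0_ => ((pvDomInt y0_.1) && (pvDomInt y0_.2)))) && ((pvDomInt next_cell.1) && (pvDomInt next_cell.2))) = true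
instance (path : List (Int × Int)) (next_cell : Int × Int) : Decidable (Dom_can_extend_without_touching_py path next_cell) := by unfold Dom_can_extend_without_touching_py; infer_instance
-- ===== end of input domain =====

-- B replaces A's whole-path Chebyshev-distance scan by one occupied-set build plus 8 fixed
-- neighbour lookups (alternative data-structure formulation, same asymptotic cost).


-- ===== PORT A =====
-- the `for i, cell in enumerate(path)` loop (i is unused); branches in Python order
def pvALoop (last nc : Int × Int) : List (Int × Int) → Bool
  | [] => true
  | c :: rest =>
    if c = last then pvALoop last nc rest
    else if max |c.1 - nc.1| |c.2 - nc.2| = 1 then false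
    else pvALoop last nc rest

def can_extend_without_touching_py (path : List (Int × Int)) (next_cell : Int × Int) : Bool :=
  match PySem.List.pyGet? path (-1) with  -- last = path[-1]; none = IndexError, excluded by Pre_
  | none => true
  | some last => pvALoop last next_cell path

-- ===== PORT B =====
-- the nested `for dr … for dc …` loops, flattened in the same order; (0,0) skipped as in Source B
def pvOffsets : List (Int × Int) :=
  [(-1,-1),(-1,0),(-1,1),(0,-1),(0,0),(0,1),(1,-1),(1,0),(1,1)]

def pvBLoop (occ : PySem.Set (Int × Int)) (nc : Int × Int) : List (Int × Int) → Bool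
  | [] => true
  | d :: rest =>
    if d.1 = 0 ∧ d.2 = 0 then pvBLoop occ nc rest
    else if PySem.Set.contains occ (nc.1 + d.1, nc.2 + d.2) then false
    else pvBLoop occ nc rest

def can_extend_without_touching_py_alt (path : List (Int × Int)) (next_cell : Int × Int) : Bool :=
  match PySem.List.pyGet? path (-1) with  -- last = path[-1]
  | none => true
  | some last =>
    let occupied := PySem.Set.discard (PySem.Set.ofList path) last
    pvBLoop occupied next_cell pvOffsets

-- ===== PRECONDITION & SPEC =====
-- Pre_ excludes only the empty path, on which Python A raises IndexError at path[-1].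
def Pre_can_extend_without_touching_py (path : List (Int × Int)) (next_cell : Int × Int) : Prop := path ≠ []
instance (path : List (Int × Int)) (next_cell : Int × Int) : Decidable (Pre_can_extend_without_touching_py path next_cell) := by unfold Pre_can_extend_without_touching_py; infer_instance
def pvWitness_can_extend_without_touching_py : (List (Int × Int)) × (Int × Int) := ([((0 : Int), (0 : Int)), (0, 1)], (0, 2))

def Spec_can_extend_without_touching_py (path : List (Int × Int)) (next_cell : Int × Int) (out : Bool) : Prop := out = can_extend_without_touching_py_alt path next_cell
instance (path : List (Int × Int)) (next_cell : Int × Int) (out : Bool) : Decidable (Spec_can_extend_without_touching_py path next_cell out) := by unfold Spec_can_extend_without_touching_py; infer_instance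

-- ===== CLAIM (what is proved, stated in full; the proofs are below) =====
def Claim_equal_can_extend_without_touching_py : Prop := ∀ (path : List (Int × Int)) (next_cell : Int × Int), Dom_can_extend_without_touching_py path next_cell → Pre_can_extend_without_touching_py path next_cell → Spec_can_extend_without_touching_py path next_cell (can_extend_without_touching_py path next_cell)

-- ===== LEMMAS AND PROOFS =====

-- A's loop returns true iff no path cell other than `last` is a Chebyshev-1 neighbour of nc.
theorem pvALoop_eq_true_iff (last nc : Int × Int) (l : List (Int × Int)) :
    pvALoop last nc l = true ↔ ∀ c ∈ l, c ≠ last → max |c.1 - nc.1| |c.2 - nc.2| ≠ 1 := by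
  induction l with
  | nil => simp [pvALoop]
  | cons c rest ih =>
    simp only [pvALoop]
    split_ifs with h1 h2
    · subst h1; simp [ih]
    · constructor
      · intro h; exact absurd h (by simp)
      · intro h; exact absurd h2 (h c List.mem_cons_self h1)
    · simp only [List.mem_cons]
      constructor
      · rintro h x (rfl | hx) hne
        · exact h2
        · exact (ih.mp h) x hx hne
      · intro h; exact ih.mpr (fun x hx => h x (Or.inr hx))

-- B's loop over the fixed offset list returns true iff none of the 8 neighbours is occupied.
theorem pvBLoop_eq_true_iff (occ : PySem.Set (Int × Int)) (nc : Int × Int) :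
    pvBLoop occ nc pvOffsets = true ↔
      ∀ d ∈ pvOffsets, ¬(d.1 = 0 ∧ d.2 = 0) → (nc.1 + d.1, nc.2 + d.2) ∉ occ := by
  have key : ∀ ds : List (Int × Int), pvBLoop occ nc ds = true ↔
      ∀ d ∈ ds, ¬(d.1 = 0 ∧ d.2 = 0) → (nc.1 + d.1, nc.2 + d.2) ∉ occ := by
    intro ds
    induction ds with
    | nil => simp [pvBLoop]
    | cons d rest ih =>
      simp only [pvBLoop]
      split_ifs with h1 h2
      · simp only [ih, List.mem_cons]
        constructor
        · rintro h x (rfl | hx) hne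
          · exact absurd h1 hne
          · exact h x hx hne
        · intro h x hx; exact h x (Or.inr hx)
      · constructor
        · intro h; exact absurd h (by simp)
        · intro h
          exact absurd ((PySem.Set.contains_iff occ _).mp h2)
            (h d (List.mem_cons_self) h1)
      · simp only [ih, List.mem_cons]
        constructor
        · rintro h x (rfl | hx) hne
          · intro hmem
            exact h2 ((PySem.Set.contains_iff occ _).mpr hmem)
          · exact h x hx hne
        · intro h x hx; exact h x (Or.inr hx)
  exact key pvOffsets

-- Chebyshev distance 1 from nc ↔ the cell is nc plus one of the 8 non-zero offsets.
theorem pvCheb_iff (c nc : Int × Int) :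
    (max |c.1 - nc.1| |c.2 - nc.2| = 1) ↔
      ∃ d ∈ pvOffsets, ¬(d.1 = 0 ∧ d.2 = 0) ∧ c = (nc.1 + d.1, nc.2 + d.2) := by
  constructor
  · intro h
    have ha : |c.1 - nc.1| ≤ 1 := h ▸ le_max_left _ _
    have hb : |c.2 - nc.2| ≤ 1 := h ▸ le_max_right _ _
    have hab : |c.1 - nc.1| = 1 ∨ |c.2 - nc.2| = 1 := by
      rcases le_total |c.2 - nc.2| |c.1 - nc.1| with hle | hle
      · left; rw [max_eq_left hle] at h; exact h
      · right; rw [max_eq_right hle] at h; exact h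
    have ha' : -1 ≤ c.1 - nc.1 ∧ c.1 - nc.1 ≤ 1 := abs_le.mp ha
    have hb' : -1 ≤ c.2 - nc.2 ∧ c.2 - nc.2 ≤ 1 := abs_le.mp hb
    have hab' : (c.1 - nc.1 = 1 ∨ c.1 - nc.1 = -1) ∨ (c.2 - nc.2 = 1 ∨ c.2 - nc.2 = -1) :=
      hab.imp (abs_eq (by norm_num)).mp (abs_eq (by norm_num)).mp
    clear ha hb hab h
    refine ⟨(c.1 - nc.1, c.2 - nc.2), ?_, ?_, ?_⟩
    · simp only [pvOffsets, List.mem_cons, Prod.ext_iff]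
      omega
    · dsimp only
      omega
    · simp
  · rintro ⟨d, hd, hne, rfl⟩
    fin_cases hd <;> simp_all

-- ===== VERDICT (by name: the statement is the Claim_ definition above) =====
theorem can_extend_without_touching_py_spec : Claim_equal_can_extend_without_touching_py := by
  intro path nc _ hpre
  unfold Spec_can_extend_without_touching_py
  unfold can_extend_without_touching_py can_extend_without_touching_py_alt
  cases hlast : PySem.List.pyGet? path (-1) with
  | none => rfl
  | some last =>
    simp only
    rw [Bool.eq_iff_iff, pvALoop_eq_true_iff, pvBLoop_eq_true_iff]
    constructor
    · intro h d hd hne hmem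
      rw [PySem.Set.mem_discard, PySem.Set.mem_ofList] at hmem
      exact h _ hmem.1 hmem.2 ((pvCheb_iff _ nc).mpr ⟨d, hd, hne, rfl⟩)
    · intro h c hc hne hcheb
      obtain ⟨d, hd, hdne, rfl⟩ := (pvCheb_iff c nc).mp hcheb
      exact h d hd hdne (by rw [PySem.Set.mem_discard, PySem.Set.mem_ofList]; exact ⟨hc, hne⟩)
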